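-- pv_equiv track=rewrite | github.com/pypi-data/pypi-mirror-379 | packages/nova-cli-ai/nova_cli_ai-1.0.1.tar.gz/nova_cli_ai-1.0.1/nova_cli/src/agents/business_consultant.py | extract_market_details
-- ===== SOURCE A (Python) =====
-- from typing import Dict, List, Any, Optional, Tuple, Union
--
-- def extract_market_details(query: str) -> Dict:
--     """Extract market analysis details"""
--     details = {'analysis_type': None, 'scope': None}
--     query_lower = query.lower()
--
--     if any(word in query_lower for word in ['competitor', 'competition']):
--         details['analysis_type'] = 'competitive_analysis'
--     elif any(word in query_lower for word in ['customer', 'target market']):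
--         details['analysis_type'] = 'customer_analysis'
--     elif any(word in query_lower for word in ['market size', 'opportunity']):
--         details['analysis_type'] = 'market_sizing'
--
--     return details
-- ===== SOURCE B (Python) =====
-- # Flat keyword->label pairs listed in REVERSE priority order: a single
-- # overwrite pass makes the highest-priority match win, no break/any needed.
-- _EMD_KEYWORD_LABELS = [
--     ('market size', 'market_sizing'),
--     ('opportunity', 'market_sizing'),
--     ('customer', 'customer_analysis'),
--     ('target market', 'customer_analysis'),
--     ('competitor', 'competitive_analysis'),
--     ('competition', 'competitive_analysis'),
-- ]
--
-- def extract_market_details(query: str):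
--     """Extract market analysis details"""
--     q = query.lower()
--     analysis_type = None
--     for keyword, label in _EMD_KEYWORD_LABELS:
--         if keyword in q:
--             analysis_type = label
--     return {'analysis_type': analysis_type, 'scope': None}
-- ===== Notes on version B (the rewrite author's own statement) =====
-- stated objective: alternative
-- what changed: Replaces the first-match if/elif priority chain with a single overwrite fold over flat keyword-to-label pairs listed in reverse priority order, so the last matching write (highest priority) wins and no early exit or per-rule any() exists.
import Mathlib
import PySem

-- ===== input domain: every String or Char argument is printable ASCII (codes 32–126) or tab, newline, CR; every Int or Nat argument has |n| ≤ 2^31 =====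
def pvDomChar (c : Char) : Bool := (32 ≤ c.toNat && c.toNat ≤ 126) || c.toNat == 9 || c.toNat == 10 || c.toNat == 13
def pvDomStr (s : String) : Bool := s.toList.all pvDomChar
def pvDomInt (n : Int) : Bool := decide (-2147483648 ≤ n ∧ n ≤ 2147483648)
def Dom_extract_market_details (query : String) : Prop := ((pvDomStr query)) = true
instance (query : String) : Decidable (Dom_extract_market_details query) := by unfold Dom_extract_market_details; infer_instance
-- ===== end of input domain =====

-- B replaces the first-match if/elif chain with an overwrite fold over flat keyword/label pairs in reverse priority order (alternative decomposition, same cost).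

-- ===== PORT A =====
-- literal port: dict initialised, lowered query, if/elif chain overwriting 'analysis_type'
def extract_market_details (query : String) : List (String × Option String) :=
  let details : PySem.Dict String (Option String) :=
    (PySem.Dict.empty.insert "analysis_type" none).insert "scope" none
  let query_lower := PySem.Str.lower query
  let details :=
    if ["competitor", "competition"].any (fun w => PySem.Str.isIn w query_lower) then
      details.insert "analysis_type" (some "competitive_analysis")
    else if ["customer", "target market"].any (fun w => PySem.Str.isIn w query_lower) then
      details.insert "analysis_type" (some "customer_analysis")
    else if ["market size", "opportunity"].any (fun w => PySem.Str.isIn w query_lower) then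
      details.insert "analysis_type" (some "market_sizing")
    else details
  details.items

-- ===== PORT B =====
-- flat keyword→label pairs in REVERSE priority order; overwriting fold, last write wins
def emdKeywordLabels : List (String × String) :=
  [("market size", "market_sizing"),
   ("opportunity", "market_sizing"),
   ("customer", "customer_analysis"),
   ("target market", "customer_analysis"),
   ("competitor", "competitive_analysis"),
   ("competition", "competitive_analysis")]

def extract_market_details_alt (query : String) : List (String × Option String) :=
  let q := PySem.Str.lower query
  let analysis_type :=
    emdKeywordLabels.foldl
      (fun acc kl => if PySem.Str.isIn kl.1 q then some kl.2 else acc) none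
  [("analysis_type", analysis_type), ("scope", none)]

-- ===== PRECONDITION & SPEC =====
def Spec_extract_market_details (query : String) (out : List (String × Option String)) : Prop := out = extract_market_details_alt query
instance (query : String) (out : List (String × Option String)) : Decidable (Spec_extract_market_details query out) := by unfold Spec_extract_market_details; infer_instance

-- ===== CLAIM (what is proved, stated in full; the proofs are below) =====
def Claim_equal_extract_market_details : Prop := ∀ (query : String), Dom_extract_market_details query → Spec_extract_market_details query (extract_market_details query)

-- ===== LEMMAS AND PROOFS =====

-- ===== VERDICT (by name: the statement is the Claim_ definition above) =====
set_option maxHeartbeats 2000000 in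
theorem extract_market_details_spec : Claim_equal_extract_market_details := by
  intro query _
  unfold Spec_extract_market_details extract_market_details extract_market_details_alt emdKeywordLabels
  cases h1 : PySem.Chars.isIn ['c', 'o', 'm', 'p', 'e', 't', 'i', 't', 'o', 'r'] (PySem.Chars.lower query.toList) <;>
  cases h2 : PySem.Chars.isIn ['c', 'o', 'm', 'p', 'e', 't', 'i', 't', 'i', 'o', 'n'] (PySem.Chars.lower query.toList) <;>
  cases h3 : PySem.Chars.isIn ['c', 'u', 's', 't', 'o', 'm', 'e', 'r'] (PySem.Chars.lower query.toList) <;>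
  cases h4 : PySem.Chars.isIn ['t', 'a', 'r', 'g', 'e', 't', ' ', 'm', 'a', 'r', 'k', 'e', 't'] (PySem.Chars.lower query.toList) <;>
  cases h5 : PySem.Chars.isIn ['m', 'a', 'r', 'k', 'e', 't', ' ', 's', 'i', 'z', 'e'] (PySem.Chars.lower query.toList) <;>
  cases h6 : PySem.Chars.isIn ['o', 'p', 'p', 'o', 'r', 't', 'u', 'n', 'i', 't', 'y'] (PySem.Chars.lower query.toList) <;>
  simp [h1, h2, h3, h4, h5, h6, List.foldl, PySem.Dict.insert, PySem.Dict.empty]
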